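-- pv_equiv track=rewrite | github.com/krzyzanowskik/grizly | grizly/utils.py | check_if_valid_type
-- ===== SOURCE A (Python) =====
-- def check_if_valid_type(type:str):
--     """Checks if given type is valid in Redshift.
--
--     Parameters
--     ----------
--     type : str
--         Input type
--
--     Returns
--     -------
--     bool
--         True if type is valid, False if not
--     """
--     valid_types = [
--         'SMALLINT',
--         'INT2',
--         'INTEGER',
--         'INT',
--         'INT4',
--         'BIGINT',
--         'INT8',
--         'DECIMAL',
--         'NUMERIC',
--         'REAL',
--         'FLOAT4',
--         'DOUBLE PRECISION',
--         'FLOAT8',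
--         'FLOAT',
--         'BOOLEAN',
--         'BOOL',
--         'CHAR',
--         'CHARACTER',
--         'NCHAR',
--         'BPCHAR',
--         'VARCHAR',
--         'CHARACTER VARYING',
--         'NVARCHAR',
--         'TEXT',
--         'DATE',
--         'TIMESTAMP',
--         'TIMESTAMP WITHOUT TIME ZONE',
--         'TIMESTAMPTZ',
--         'TIMESTAMP WITH TIME ZONE'
--         ]
--
--     for valid_type in valid_types:
--         if type.upper().startswith(valid_type):
--             return True
--     return False
-- ===== SOURCE B (Python) =====
-- def check_if_valid_type(type: str):
--     """Checks if given type is valid in Redshift (True iff some prefix of the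
--     upper-cased input is a valid Redshift type token)."""
--     valid = {
--         'SMALLINT', 'INT2', 'INTEGER', 'INT', 'INT4', 'BIGINT', 'INT8',
--         'DECIMAL', 'NUMERIC', 'REAL', 'FLOAT4', 'DOUBLE PRECISION', 'FLOAT8',
--         'FLOAT', 'BOOLEAN', 'BOOL', 'CHAR', 'CHARACTER', 'NCHAR', 'BPCHAR',
--         'VARCHAR', 'CHARACTER VARYING', 'NVARCHAR', 'TEXT', 'DATE',
--         'TIMESTAMP', 'TIMESTAMP WITHOUT TIME ZONE', 'TIMESTAMPTZ',
--         'TIMESTAMP WITH TIME ZONE',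
--     }
--     maxlen = max(map(len, valid))
--     up = type.upper()
--     return any(up[:i] in valid for i in range(1, min(len(up), maxlen) + 1))
-- ===== Notes on version B (the rewrite author's own statement) =====
-- stated objective: faster
-- what changed: Instead of scanning the constant token list and calling type.upper().startswith per token, B uppercases once and asks whether any bounded-length prefix of the input is a member of a set of the valid tokens, inverting the traversal (over at most 27 input prefixes, not over the token list with a fresh upper() each iteration).
import Mathlib
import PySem

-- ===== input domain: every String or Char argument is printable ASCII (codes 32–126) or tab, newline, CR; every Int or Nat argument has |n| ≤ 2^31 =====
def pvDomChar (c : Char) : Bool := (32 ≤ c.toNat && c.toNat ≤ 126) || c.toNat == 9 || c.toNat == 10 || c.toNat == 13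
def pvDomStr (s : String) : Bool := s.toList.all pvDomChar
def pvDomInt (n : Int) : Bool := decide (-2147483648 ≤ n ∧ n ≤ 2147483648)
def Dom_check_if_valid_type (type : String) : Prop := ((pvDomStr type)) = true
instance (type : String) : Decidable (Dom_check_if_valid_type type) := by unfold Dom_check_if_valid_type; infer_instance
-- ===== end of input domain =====

-- B rephrases "the input starts with a valid token" as "some prefix of the upper-cased
-- input is a member of a set of valid tokens", iterating over input prefixes instead of the token list.
-- ===== PORT A =====
def validTypesA : List String :=
  ["SMALLINT", "INT2", "INTEGER", "INT", "INT4", "BIGINT", "INT8", "DECIMAL", "NUMERIC", "REAL", "FLOAT4", "DOUBLE PRECISION", "FLOAT8", "FLOAT", "BOOLEAN", "BOOL", "CHAR", "CHARACTER", "NCHAR", "BPCHAR", "VARCHAR", "CHARACTER VARYING", "NVARCHAR", "TEXT", "DATE", "TIMESTAMP", "TIMESTAMP WITHOUT TIME ZONE", "TIMESTAMPTZ", "TIMESTAMP WITH TIME ZONE"]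

def aLoop (type : String) : List String → Bool
  | [] => false
  | t :: rest =>
      if PySem.Str.startswith (PySem.Str.upper type) t then true else aLoop type rest

def check_if_valid_type (type : String) : Bool := aLoop type validTypesA

-- ===== PORT B =====
def validSetB : PySem.Set String :=
  PySem.Set.ofList
    ["SMALLINT", "INT2", "INTEGER", "INT", "INT4", "BIGINT", "INT8", "DECIMAL", "NUMERIC", "REAL", "FLOAT4", "DOUBLE PRECISION", "FLOAT8", "FLOAT", "BOOLEAN", "BOOL", "CHAR", "CHARACTER", "NCHAR", "BPCHAR", "VARCHAR", "CHARACTER VARYING", "NVARCHAR", "TEXT", "DATE", "TIMESTAMP", "TIMESTAMP WITHOUT TIME ZONE", "TIMESTAMPTZ", "TIMESTAMP WITH TIME ZONE"]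

-- max(map(len, valid)); the none branch is unreachable (validSetB is non-empty) and only makes the match total
def maxlenB : Int :=
  match PySem.List.max? (validSetB.map (fun t => PySem.Str.len t)) (fun x => x) with
  | some m => m
  | none => 0

def check_if_valid_type_alt (type : String) : Bool :=
  let up := PySem.Str.upper type
  (PySem.List.pyRange 1 (min (PySem.Str.len up) maxlenB + 1)).any
    (fun i => validSetB.contains (PySem.Str.slice up none (some i)))
-- ===== PRECONDITION & SPEC =====
def Spec_check_if_valid_type (type : String) (out : Bool) : Prop := out = check_if_valid_type_alt type
instance (type : String) (out : Bool) : Decidable (Spec_check_if_valid_type type out) := by unfold Spec_check_if_valid_type; infer_instance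

-- ===== CLAIM (what is proved, stated in full; the proofs are below) =====
def Claim_equal_check_if_valid_type : Prop := ∀ (type : String), Dom_check_if_valid_type type → Spec_check_if_valid_type type (check_if_valid_type type)


-- ===== LEMMAS AND PROOFS =====
theorem aLoop_eq_any (type : String) (ts : List String) :
    aLoop type ts = ts.any (fun t => PySem.Str.startswith (PySem.Str.upper type) t) := by
  induction ts with
  | nil => rfl
  | cons t rest ih => simp [aLoop, ih]

theorem validSetB_eq : validSetB = validTypesA := by decide

theorem validTypesA_nonempty_toks : ∀ t ∈ validTypesA, 1 ≤ t.toList.length := by decide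

theorem validTypesA_len_le : ∀ t ∈ validTypesA, t.toList.length ≤ 27 := by decide

theorem maxlenB_eq : maxlenB = 27 := by decide

-- ===== VERDICT (by name: the statement is the Claim_ definition above) =====
theorem check_if_valid_type_spec : Claim_equal_check_if_valid_type := by
  intro type _
  unfold Spec_check_if_valid_type check_if_valid_type check_if_valid_type_alt
  rw [aLoop_eq_any]
  apply Bool.eq_iff_iff.mpr
  simp only [List.any_eq_true, validSetB_eq, PySem.Set.contains_iff,
    PySem.Str.startswith, PySem.Chars.startswith, List.isPrefixOf_iff_prefix,
    PySem.List.mem_pyRange_one, PySem.Str.len]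
  constructor
  · rintro ⟨t, ht, hpre⟩
    refine ⟨(t.toList.length : Int), ⟨?_, ?_⟩, ?_⟩
    · exact_mod_cast validTypesA_nonempty_toks t ht
    · have h1 := hpre.length_le
      have h2 := validTypesA_len_le t ht
      have h3 := maxlenB_eq
      omega
    · have hsl : PySem.Str.slice (PySem.Str.upper type) none (some (t.toList.length : Int)) = t := by
        have h := List.prefix_iff_eq_take.mp hpre
        simp only [PySem.Str.slice, PySem.Chars.slice_eq_listSlice,
          PySem.List.slice_to_natCast, ← h, String.ofList_toList]
      rw [hsl]; exact ht
  · rintro ⟨i, ⟨h1, _⟩, hmem⟩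
    refine ⟨_, hmem, ?_⟩
    simp only [PySem.Str.slice, PySem.Chars.slice_eq_listSlice, String.toList_ofList,
      PySem.List.slice_to ((PySem.Str.upper type).toList) (by omega : (0:Int) ≤ i)]
    exact List.take_prefix _ _
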